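-- pv_equiv track=rewrite | github.com/rafayel01/python-exercises | RV_exercises_up_to_400.py | program_304
-- ===== SOURCE A (Python) =====
-- def program_304(n: int) -> list[int]:
--     lst: list = []
--     num: int = 1
--     while num < n - 1:
--         if n % num == 2:
--             lst.append(num)
--             num += 1
--         else:
--             num += 1
--     return lst
-- ===== SOURCE B (Python) =====
-- def program_304(n: int) -> list[int]:
--     # divisor enumeration of m = n-2 up to sqrt(m): n % num == 2 iff num > 2 and num divides n-2
--     m = n - 2
--     if m <= 2:
--         return []
--     divs = set()
--     i = 1
--     while i * i <= m:
--         if m % i == 0: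
--             if i > 2:
--                 divs.add(i)
--             q = m // i
--             if q > 2:
--                 divs.add(q)
--         i += 1
--     return sorted(divs)
-- ===== Notes on version B (the rewrite author's own statement) =====
-- stated objective: faster
-- what changed: Replaces the linear scan of all num < n-1 testing n % num == 2 by enumerating divisors of n-2 up to sqrt(n-2) (n % num == 2 iff num > 2 and num divides n-2), collecting them in a set and sorting.
import Mathlib
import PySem

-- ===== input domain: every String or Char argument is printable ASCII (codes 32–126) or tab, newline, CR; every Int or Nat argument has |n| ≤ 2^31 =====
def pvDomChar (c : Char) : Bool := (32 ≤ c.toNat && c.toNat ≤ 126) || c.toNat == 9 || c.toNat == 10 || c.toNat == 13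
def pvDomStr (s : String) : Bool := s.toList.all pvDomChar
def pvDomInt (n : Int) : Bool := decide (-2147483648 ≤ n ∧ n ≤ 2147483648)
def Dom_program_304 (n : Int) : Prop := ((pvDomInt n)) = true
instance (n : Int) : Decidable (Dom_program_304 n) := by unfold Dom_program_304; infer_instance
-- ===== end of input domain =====

-- B replaces A's linear scan over all num < n-1 by enumerating the divisors of n-2 up to sqrt(n-2)
-- (n % num == 2 iff num > 2 and num divides n-2), collected in a set and sorted: O(sqrt n) vs O(n).

-- ===== PORT A =====
-- while num < n - 1: if n % num == 2 then append num; num += 1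
def program_304_loop (n num : Int) (lst : List Int) : List Int :=
  if h : num < n - 1 then
    if PySem.Int.mod n num = 2 then
      program_304_loop n (num + 1) (lst ++ [num])
    else
      program_304_loop n (num + 1) lst
  else lst
termination_by (n - 1 - num).toNat
decreasing_by all_goals omega

def program_304 (n : Int) : List Int := program_304_loop n 1 []

-- ===== PORT B =====
-- i*i ≤ m needs i ≤ m, for termination of the trial-division loop
theorem pv_le_of_sq_le (i m : Int) (h : i * i ≤ m) : i ≤ m := by
  have h1 : 0 ≤ i * i := mul_self_nonneg i
  have h2 : 2 * i - 1 ≤ i * i := by nlinarith [mul_self_nonneg (i - 1)]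
  omega

-- while i*i <= m: if m % i == 0: add i if i>2; add m//i if m//i>2; i += 1
def program_304_alt_loop (m i : Int) (divs : PySem.Set Int) : PySem.Set Int :=
  if h : i * i ≤ m then
    program_304_alt_loop m (i + 1)
      (if PySem.Int.mod m i = 0 then
        (let d1 := if 2 < i then PySem.Set.add divs i else divs
         if 2 < PySem.Int.floordiv m i then PySem.Set.add d1 (PySem.Int.floordiv m i) else d1)
       else divs)
  else divs
termination_by (m - i + 1).toNat
decreasing_by
  have := pv_le_of_sq_le i m h
  omega

def program_304_alt (n : Int) : List Int :=
  let m := n - 2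
  if m ≤ 2 then []
  else PySem.List.sorted (program_304_alt_loop m 1 PySem.Set.empty) (fun x => x) false

-- ===== PRECONDITION & SPEC =====
def Spec_program_304 (n : Int) (out : List Int) : Prop := out = program_304_alt n
instance (n : Int) (out : List Int) : Decidable (Spec_program_304 n out) := by unfold Spec_program_304; infer_instance

-- ===== CLAIM (what is proved, stated in full; the proofs are below) =====
def Claim_equal_program_304 : Prop := ∀ (n : Int), Dom_program_304 n → Spec_program_304 n (program_304 n)

-- ===== LEMMAS AND PROOFS =====

-- n % x == 2 (positive x) is exactly: x > 2 and x divides n - 2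
theorem pv_modA (n x : Int) (hx : 0 < x) : PySem.Int.mod n x = 2 ↔ 2 < x ∧ x ∣ (n - 2) := by
  rw [PySem.Int.mod_eq_emod_of_pos hx]
  constructor
  · intro h
    have hlt : n % x < x := Int.emod_lt_of_pos n hx
    refine ⟨by omega, ⟨n / x, ?_⟩⟩
    have := Int.mul_ediv_add_emod n x
    omega
  · rintro ⟨h2, d, hd⟩
    have hn : n = 2 + x * d := by omega
    rw [hn, Int.add_mul_emod_self_left]
    exact Int.emod_eq_of_lt (by norm_num) h2

-- invariant for A's loop: output is strictly increasing and its members are exactly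
-- old members plus the num in [num, n-1) with n % num == 2
theorem pv_A_loop_spec (n : Int) : ∀ (k : Nat) (num : Int) (lst : List Int),
    (n - 1 - num).toNat ≤ k → (∀ y ∈ lst, y < num) → lst.Pairwise (· < ·) →
    (program_304_loop n num lst).Pairwise (· < ·) ∧
    (∀ x, x ∈ program_304_loop n num lst ↔
      x ∈ lst ∨ (num ≤ x ∧ x < n - 1 ∧ PySem.Int.mod n x = 2)) := by
  intro k
  induction k with
  | zero =>
    intro num lst hk hlt hp
    have hstop : ¬ num < n - 1 := by omega
    rw [program_304_loop]
    simp only [hstop, dite_false]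
    refine ⟨hp, fun x => ⟨fun h => Or.inl h, ?_⟩⟩
    rintro (h | ⟨h1, h2, -⟩)
    · exact h
    · omega
  | succ k ih =>
    intro num lst hk hlt hp
    by_cases h : num < n - 1
    · rw [program_304_loop]
      simp only [h, dite_true]
      by_cases hm : PySem.Int.mod n num = 2
      · simp only [hm, if_true]
        have hlt' : ∀ y ∈ lst ++ [num], y < num + 1 := by
          intro y hy
          rcases List.mem_append.1 hy with hy | hy
          · have := hlt y hy; omega
          · simp at hy; omega
        have hp' : (lst ++ [num]).Pairwise (· < ·) := by
          rw [List.pairwise_append]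
          exact ⟨hp, List.pairwise_singleton _ _, fun a ha b hb => by simp at hb; subst hb; exact hlt a ha⟩
        obtain ⟨hP, hM⟩ := ih (num + 1) (lst ++ [num]) (by omega) hlt' hp'
        refine ⟨hP, fun x => ?_⟩
        rw [hM x, List.mem_append]
        constructor
        · rintro ((hx | hx) | ⟨h1, h2, h3⟩)
          · exact Or.inl hx
          · simp at hx; subst hx; exact Or.inr ⟨le_refl _, h, hm⟩
          · exact Or.inr ⟨by omega, h2, h3⟩
        · rintro (hx | ⟨h1, h2, h3⟩)
          · exact Or.inl (Or.inl hx)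
          · by_cases hxn : x = num
            · exact Or.inl (Or.inr (by simp [hxn]))
            · exact Or.inr ⟨by omega, h2, h3⟩
      · simp only [hm, if_false]
        obtain ⟨hP, hM⟩ := ih (num + 1) lst (by omega) (fun y hy => by have := hlt y hy; omega) hp
        refine ⟨hP, fun x => ?_⟩
        rw [hM x]
        constructor
        · rintro (hx | ⟨h1, h2, h3⟩)
          · exact Or.inl hx
          · exact Or.inr ⟨by omega, h2, h3⟩
        · rintro (hx | ⟨h1, h2, h3⟩)
          · exact Or.inl hx
          · by_cases hxn : x = num
            · subst hxn; exact absurd h3 hm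
            · exact Or.inr ⟨by omega, h2, h3⟩
    · rw [program_304_loop]
      simp only [h, dite_false]
      refine ⟨hp, fun x => ⟨fun hx => Or.inl hx, ?_⟩⟩
      rintro (hx | ⟨h1, h2, -⟩)
      · exact hx
      · omega

theorem pv_A_pairwise (n : Int) : (program_304 n).Pairwise (· < ·) :=
  (pv_A_loop_spec n (n - 2).toNat 1 [] (by omega) (by simp) (by simp)).1

theorem pv_A_mem (n x : Int) : x ∈ program_304 n ↔ 2 < x ∧ x < n - 1 ∧ x ∣ (n - 2) := by
  have h := (pv_A_loop_spec n (n - 2).toNat 1 [] (by omega) (by simp) (by simp)).2 x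
  unfold program_304
  rw [h]
  simp only [List.not_mem_nil, false_or]
  constructor
  · rintro ⟨h1, h2, h3⟩
    obtain ⟨hx2, hdvd⟩ := (pv_modA n x (by omega)).1 h3
    exact ⟨hx2, h2, hdvd⟩
  · rintro ⟨h1, h2, h3⟩
    exact ⟨by omega, h2, (pv_modA n x (by omega)).2 ⟨h1, h3⟩⟩

-- invariant for B's trial-division loop: members of the resulting set
theorem pv_B_loop_spec (m : Int) : ∀ (k : Nat) (i : Int) (s : PySem.Set Int),
    (m - i + 1).toNat ≤ k → 1 ≤ i → s.Nodup →
    (program_304_alt_loop m i s).Nodup ∧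
    (∀ x, x ∈ program_304_alt_loop m i s ↔ x ∈ s ∨
      ∃ j, i ≤ j ∧ j * j ≤ m ∧ j ∣ m ∧
        ((x = j ∧ 2 < j) ∨ (x = PySem.Int.floordiv m j ∧ 2 < PySem.Int.floordiv m j))) := by
  intro k
  induction k with
  | zero =>
    intro i s hk hi hnd
    have hstop : ¬ i * i ≤ m := by
      intro hle
      have := pv_le_of_sq_le i m hle
      omega
    rw [program_304_alt_loop]
    simp only [hstop, dite_false]
    refine ⟨hnd, fun x => ⟨fun h => Or.inl h, ?_⟩⟩
    rintro (h | ⟨j, hj1, hj2, _, _⟩)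
    · exact h
    · have := pv_le_of_sq_le j m hj2
      omega
  | succ k ih =>
    intro i s hk hi hnd
    by_cases h : i * i ≤ m
    · have him : i ≤ m := pv_le_of_sq_le i m h
      rw [program_304_alt_loop]
      simp only [h, dite_true]
      set s' := (if PySem.Int.mod m i = 0 then
          (let d1 := if 2 < i then PySem.Set.add s i else s
           if 2 < PySem.Int.floordiv m i then PySem.Set.add d1 (PySem.Int.floordiv m i) else d1)
         else s) with hs'
      have hnd' : s'.Nodup := by
        rw [hs']
        split_ifs <;> first
          | exact hnd
          | exact PySem.Set.nodup_add _ _ hnd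
          | exact PySem.Set.nodup_add _ _ (PySem.Set.nodup_add _ _ hnd)
      have hmem' : ∀ x, x ∈ s' ↔ x ∈ s ∨ (i ∣ m ∧
          ((x = i ∧ 2 < i) ∨ (x = PySem.Int.floordiv m i ∧ 2 < PySem.Int.floordiv m i))) := by
        intro x
        rw [hs']
        by_cases hdv : PySem.Int.mod m i = 0
        · have hdvd : i ∣ m := (PySem.Int.mod_eq_zero_iff_dvd m i).1 hdv
          rw [if_pos hdv]
          split_ifs with h2i h2q h2q <;>
            simp only [PySem.Set.mem_add] <;> tauto
        · have hndvd : ¬ i ∣ m := fun hd => hdv ((PySem.Int.mod_eq_zero_iff_dvd m i).2 hd)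
          rw [if_neg hdv]
          tauto
      obtain ⟨hP, hM⟩ := ih (i + 1) s' (by omega) (by omega) hnd'
      refine ⟨hP, fun x => ?_⟩
      rw [hM x, hmem' x]
      constructor
      · rintro ((hx | ⟨hdvd, hcase⟩) | ⟨j, hj1, hj2, hj3, hj4⟩)
        · exact Or.inl hx
        · exact Or.inr ⟨i, le_refl _, h, hdvd, hcase⟩
        · exact Or.inr ⟨j, by omega, hj2, hj3, hj4⟩
      · rintro (hx | ⟨j, hj1, hj2, hj3, hj4⟩)
        · exact Or.inl (Or.inl hx)
        · by_cases hji : j = i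
          · subst hji; exact Or.inl (Or.inr ⟨hj3, hj4⟩)
          · exact Or.inr ⟨j, by omega, hj2, hj3, hj4⟩
    · rw [program_304_alt_loop]
      simp only [h, dite_false]
      refine ⟨hnd, fun x => ⟨fun hx => Or.inl hx, ?_⟩⟩
      rintro (hx | ⟨j, hj1, hj2, hj3, hj4⟩)
      · exact hx
      · exfalso
        have : i * i ≤ j * j := by nlinarith
        omega

-- the search up to sqrt finds exactly the divisors of m that exceed 2
theorem pv_B_exists_iff (m x : Int) (hm : 2 < m) :
    (∃ j, 1 ≤ j ∧ j * j ≤ m ∧ j ∣ m ∧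
      ((x = j ∧ 2 < j) ∨ (x = PySem.Int.floordiv m j ∧ 2 < PySem.Int.floordiv m j))) ↔
    (2 < x ∧ x ∣ m) := by
  constructor
  · rintro ⟨j, hj1, hj2, hj3, hcase⟩
    have hfd : PySem.Int.floordiv m j = m / j := PySem.Int.floordiv_eq_ediv_of_pos (by omega)
    rcases hcase with ⟨hx, h2⟩ | ⟨hx, h2⟩
    · subst hx; exact ⟨h2, hj3⟩
    · rw [hfd] at hx h2
      obtain ⟨c, hc⟩ := hj3
      have hq : m / j = c := by rw [hc]; exact Int.mul_ediv_cancel_left c (by omega)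
      rw [hq] at hx h2
      subst hx
      exact ⟨h2, Dvd.intro_left j (by omega)⟩
  · rintro ⟨h2, hdvd⟩
    obtain ⟨c, hc⟩ := hdvd
    have hx0 : 0 < x := by omega
    have hc0 : 0 < c := by nlinarith
    by_cases hsq : x * x ≤ m
    · exact ⟨x, by omega, hsq, ⟨c, hc⟩, Or.inl ⟨rfl, h2⟩⟩
    · refine ⟨c, by omega, ?_, ⟨x, by rw [hc]; ring⟩, Or.inr ⟨?_, ?_⟩⟩
      · -- c * c ≤ m : from m < x*x and m = x*c, c < x so c*c < c*x ≤ x*c = m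
        nlinarith
      · have hfd : PySem.Int.floordiv m c = m / c := PySem.Int.floordiv_eq_ediv_of_pos hc0
        rw [hfd, hc, mul_comm, Int.mul_ediv_cancel_left x (by omega)]
      · have hfd : PySem.Int.floordiv m c = m / c := PySem.Int.floordiv_eq_ediv_of_pos hc0
        rw [hfd, hc, mul_comm, Int.mul_ediv_cancel_left x (by omega)]
        exact h2

theorem pv_B_set_mem (m x : Int) (hm : 2 < m) :
    x ∈ program_304_alt_loop m 1 PySem.Set.empty ↔ 2 < x ∧ x ∣ m := by
  have h := (pv_B_loop_spec m (m).toNat 1 PySem.Set.empty (by omega) (by omega) (by simp [PySem.Set.empty])).2 x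
  rw [h]
  simp only [PySem.Set.empty, List.not_mem_nil, false_or]
  exact pv_B_exists_iff m x hm

-- ===== VERDICT (by name: the statement is the Claim_ definition above) =====
theorem program_304_spec : Claim_equal_program_304 := by
  unfold Claim_equal_program_304 Spec_program_304
  intro n _
  unfold program_304_alt
  by_cases hm : n - 2 ≤ 2
  · simp only [hm, if_true]
    rw [List.eq_nil_iff_forall_not_mem]
    intro x hx
    obtain ⟨h2, hlt, _⟩ := (pv_A_mem n x).1 hx
    omega
  · simp only [hm, if_false]
    replace hm : 2 < n - 2 := by omega
    have hnd := (pv_B_loop_spec (n - 2) (n - 2).toNat 1 PySem.Set.empty (by omega) (by omega)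
      (by simp [PySem.Set.empty])).1
    have hperm : (program_304 n).Perm (program_304_alt_loop (n - 2) 1 PySem.Set.empty) := by
      rw [List.perm_ext_iff_of_nodup (pv_A_pairwise n).nodup hnd]
      intro x
      rw [pv_A_mem n x, pv_B_set_mem (n - 2) x hm]
      constructor
      · rintro ⟨h1, _, h3⟩; exact ⟨h1, h3⟩
      · rintro ⟨h1, h3⟩
        have := Int.le_of_dvd (by omega) h3
        exact ⟨h1, by omega, h3⟩
    exact (PySem.List.sorted_eq_of_perm_of_pairwise_lt _ _ (fun x => x) hperm (pv_A_pairwise n)).symm
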